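-- pv_equiv track=rewrite | github.com/Ismantic/Sime | pipeline/gen_dict.py | abbrev_variants
-- ===== SOURCE A (Python) =====
-- def abbrev_variants(unit_str):
--     """对多音节拼音生成简拼变体。
--     最后一个音节保持完整，前面的缩写为首字母，然后从前往后逐个恢复。
--     """
--     syllables = unit_str.split("/")
--     n = len(syllables)
--     if n < 2:
--         return []
--     initials = [s[0] for s in syllables[:n - 1]] + [syllables[-1]]
--     variants = []
--     full_abbr = "/".join(initials)
--     if full_abbr != unit_str:
--         variants.append(full_abbr)
--     restored = list(initials)
--     for i in range(n - 2):
--         restored[i] = syllables[i]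
--         variant = "/".join(restored)
--         if variant != unit_str and (not variants or variant != variants[-1]):
--             variants.append(variant)
--     return variants
-- ===== SOURCE B (Python) =====
-- def abbrev_variants(unit_str):
--     """Closed-form variant generation: instead of generating every candidate and
--     filtering by string comparison, compute from syllable LENGTHS which variants
--     survive (a candidate collapses with its neighbour iff the restored syllable
--     is a single character, and equals unit_str iff every remaining abbreviated
--     syllable is single-character), then build only the surviving variants."""
--     syllables = unit_str.split("/")
--     n = len(syllables)
--     if n < 2:
--         return []
--     # least t such that syllables[t:n-1] are all single characters
--     t = n - 1
--     while t > 0 and len(syllables[t - 1]) == 1: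
--         t -= 1
--     keep = [k for k in range(t) if k == 0 or len(syllables[k - 1]) > 1]
--     initials = [s[0] for s in syllables[:n - 1]] + [syllables[-1]]
--     return ["/".join(syllables[:k] + initials[k:]) for k in keep]
-- ===== Notes on version B (the rewrite author's own statement) =====
-- stated objective: alternative
-- what changed: B computes from syllable lengths which variants survive (a candidate collapses with its predecessor iff the restored syllable is single-character, and equals unit_str iff all remaining abbreviated syllables are single-character), then builds only those variants directly, eliminating A's generate-then-filter loop with its string comparisons against unit_str and the last kept variant.
-- outside the precondition, e.g. on abbrev_variants('//a'): A raises IndexError, B raises IndexError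
import Mathlib
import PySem

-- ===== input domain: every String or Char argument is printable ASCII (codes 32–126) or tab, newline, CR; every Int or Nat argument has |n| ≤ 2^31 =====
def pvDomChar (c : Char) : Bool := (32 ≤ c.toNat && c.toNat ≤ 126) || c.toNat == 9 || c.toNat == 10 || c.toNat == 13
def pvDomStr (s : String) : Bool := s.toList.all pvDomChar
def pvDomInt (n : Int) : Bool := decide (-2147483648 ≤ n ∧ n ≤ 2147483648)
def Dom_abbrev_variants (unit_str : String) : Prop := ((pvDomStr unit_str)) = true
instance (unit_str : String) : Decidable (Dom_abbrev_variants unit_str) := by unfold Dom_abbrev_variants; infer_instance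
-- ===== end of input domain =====

-- B replaces A's generate-then-filter loop (string comparisons against unit_str and the last
-- kept variant) by a closed-form computation from syllable LENGTHS of which variants survive,
-- building only those; same return value (alternative decomposition, no speed claim).

-- ===== PORT A =====
def abbrev_variants (unit_str : String) : List String :=
  let syllables := (PySem.Str.split? unit_str "/").getD []
  let n : Int := syllables.length
  if n < 2 then []
  else
    let initials := (PySem.List.slice syllables none (some (n - 1))).map
        (fun s => String.ofList [(PySem.Str.pyGet? s 0).getD ' '])
      ++ [PySem.List.pyGetD syllables (-1) ""]
    let full_abbr := PySem.Str.join "/" initials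
    let variants : List String := if full_abbr ≠ unit_str then [full_abbr] else []
    let st := (PySem.List.pyRange 0 (n - 2) 1).foldl
      (fun (st : List String × List String) i =>
        let restored := PySem.List.pySetD st.2 i (PySem.List.pyGetD syllables i "")
        let variant := PySem.Str.join "/" restored
        let variants := if variant ≠ unit_str ∧
            (st.1.isEmpty = true ∨ variant ≠ PySem.List.pyGetD st.1 (-1) "") then
            st.1 ++ [variant] else st.1
        (variants, restored))
      (variants, initials)
    st.1

-- ===== PORT B =====
-- port of Source B's while-loop computing the least t with syllables[t:n-1] all single characters
def altFindT (syllables : List String) : Nat → Nat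
  | 0 => 0
  | t + 1 =>
    if PySem.Str.len (PySem.List.pyGetD syllables ((t : Int)) "") == 1 then altFindT syllables t
    else t + 1

def abbrev_variants_alt (unit_str : String) : List String :=
  let syllables := (PySem.Str.split? unit_str "/").getD []
  let n : Int := syllables.length
  if n < 2 then []
  else
    let t : Nat := altFindT syllables (syllables.length - 1)
    let keep := (PySem.List.pyRange 0 (t : Int) 1).filter
      (fun k => k == 0 || PySem.Str.len (PySem.List.pyGetD syllables (k - 1) "") > 1)
    let initials := (PySem.List.slice syllables none (some (n - 1))).map
        (fun s => String.ofList [(PySem.Str.pyGet? s 0).getD ' '])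
      ++ [PySem.List.pyGetD syllables (-1) ""]
    keep.map (fun k => PySem.Str.join "/"
      (PySem.List.slice syllables none (some k) ++ PySem.List.slice initials (some k) none))

-- ===== PRECONDITION & SPEC =====
-- Pre_ excludes exactly the inputs where Python A raises IndexError: two or more syllables
-- with an empty syllable among the first n-1 (s[0] fails); B raises there as well.
def Pre_abbrev_variants (unit_str : String) : Prop :=
  2 ≤ ((PySem.Str.split? unit_str "/").getD []).length →
    ∀ s ∈ ((PySem.Str.split? unit_str "/").getD []).dropLast, s ≠ ""
instance (unit_str : String) : Decidable (Pre_abbrev_variants unit_str) := by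
  unfold Pre_abbrev_variants; infer_instance
def pvWitness_abbrev_variants : String := "ni/hao/ma"

def Spec_abbrev_variants (unit_str : String) (out : List String) : Prop := out = abbrev_variants_alt unit_str
instance (unit_str : String) (out : List String) : Decidable (Spec_abbrev_variants unit_str out) := by unfold Spec_abbrev_variants; infer_instance

-- ===== CLAIM (what is proved, stated in full; the proofs are below) =====
def Claim_equal_abbrev_variants : Prop := ∀ (unit_str : String), Dom_abbrev_variants unit_str → Pre_abbrev_variants unit_str → Spec_abbrev_variants unit_str (abbrev_variants unit_str)

-- ===== LEMMAS AND PROOFS =====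

def pvSplit (c : Char) : List Char → List Char → List (List Char)
  | [], cur => [cur.reverse]
  | x :: rest, cur => if x = c then cur.reverse :: pvSplit c rest [] else pvSplit c rest (x :: cur)

theorem pvSplitOn_go_eq (c : Char) (fuel : Nat) (l cur : List Char) (acc : List (List Char))
    (h : l.length ≤ fuel) :
    PySem.Chars.splitOn.go [c] fuel l cur acc = acc.reverse ++ pvSplit c l cur := by
  induction fuel generalizing l cur acc with
  | zero =>
    have : l = [] := by cases l <;> simp_all
    subst this
    simp [PySem.Chars.splitOn.go, pvSplit]
  | succ fuel ih =>
    cases l with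
    | nil => simp [PySem.Chars.splitOn.go, pvSplit]
    | cons x rest =>
      by_cases hx : x = c
      · subst hx
        have hpre : List.isPrefixOf [x] (x :: rest) = true := by simp [List.isPrefixOf]
        simp only [PySem.Chars.splitOn.go, hpre, if_pos, List.length_cons, List.length_nil,
          Nat.zero_add, List.drop_succ_cons, List.drop_zero]
        rw [ih rest [] (List.reverse cur :: acc) (by simpa using Nat.le_of_succ_le_succ h)]
        simp [pvSplit]
      · have hpre : List.isPrefixOf [c] (x :: rest) = false := by
          simp [List.isPrefixOf]; exact fun hh => (hx hh.symm).elim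
        simp only [PySem.Chars.splitOn.go, hpre]
        rw [ih rest (x :: cur) acc (by simpa using Nat.le_of_succ_le_succ h)]
        simp [pvSplit, hx]

theorem pvSplit_ne_nil (c : Char) (l cur : List Char) : pvSplit c l cur ≠ [] := by
  induction l generalizing cur with
  | nil => simp [pvSplit]
  | cons x rest ih => by_cases h : x = c <;> simp [pvSplit, h, ih]

theorem pvSplitOn_eq (c : Char) (s : List Char) :
    PySem.Chars.splitOn s [c] = pvSplit c s [] := by
  unfold PySem.Chars.splitOn
  rw [pvSplitOn_go_eq c (s.length + 1) s [] [] (by omega)]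
  simp

theorem pvSplit_join (c : Char) (l cur : List Char) :
    PySem.Chars.join [c] (pvSplit c l cur) = cur.reverse ++ l := by
  induction l generalizing cur with
  | nil => simp [pvSplit, PySem.Chars.join_singleton]
  | cons x rest ih =>
    by_cases h : x = c
    · subst h
      rw [pvSplit, if_pos rfl]
      obtain ⟨p, ps, hps⟩ : ∃ p ps, pvSplit x rest [] = p :: ps := by
        cases hh : pvSplit x rest [] with
        | nil => exact absurd hh (pvSplit_ne_nil x rest [])
        | cons p ps => exact ⟨p, ps, rfl⟩
      rw [hps, PySem.Chars.join_cons_cons, ← hps, ih []]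
      simp
    · rw [pvSplit, if_neg h, ih (x :: cur)]
      simp

theorem pvSplit_free (c : Char) (l cur : List Char) (h : c ∉ cur) :
    ∀ p ∈ pvSplit c l cur, c ∉ p := by
  induction l generalizing cur with
  | nil => simpa [pvSplit] using h
  | cons x rest ih =>
    by_cases hx : x = c
    · subst hx
      rw [pvSplit, if_pos rfl]
      intro p hp
      rcases List.mem_cons.mp hp with h1 | h2
      · subst h1; simpa using h
      · exact ih [] (by simp) p h2
    · rw [pvSplit, if_neg hx]
      refine ih (x :: cur) ?_
      intro hmem
      rcases List.mem_cons.mp hmem with h1 | h2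
      · exact hx h1.symm
      · exact h h2

theorem pvSep_cancel (c : Char) (u v : List Char) :
    ∀ (a b : List Char), c ∉ a → c ∉ b → a ++ c :: u = b ++ c :: v → a = b ∧ u = v := by
  intro a
  induction a with
  | nil =>
    intro b ha hb h
    cases b with
    | nil => simpa using h
    | cons y bs =>
      simp only [List.nil_append, List.cons_append, List.cons.injEq] at h
      exact absurd h.1.symm (fun hh => hb (hh ▸ List.mem_cons_self))
  | cons x as ih =>
    intro b ha hb h
    cases b with
    | nil =>
      simp only [List.cons_append, List.nil_append, List.cons.injEq] at h
      exact absurd h.1 (fun hh => ha (hh ▸ List.mem_cons_self))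
    | cons y bs =>
      simp only [List.cons_append, List.cons.injEq] at h
      obtain ⟨h1, h2⟩ := h
      obtain ⟨h3, h4⟩ := ih bs (fun hm => ha (List.mem_cons_of_mem x hm))
        (fun hm => hb (List.mem_cons_of_mem y hm)) h2
      exact ⟨by rw [h1, h3], h4⟩

theorem pvJoin_inj (c : Char) (xs : List (List Char)) :
    ∀ (ys : List (List Char)), (∀ p ∈ xs, c ∉ p) → (∀ p ∈ ys, c ∉ p) →
      xs.length = ys.length →
      PySem.Chars.join [c] xs = PySem.Chars.join [c] ys → xs = ys := by
  induction xs with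
  | nil =>
    intro ys _ _ hlen _
    cases ys with
    | nil => rfl
    | cons b bs => simp at hlen
  | cons a as ih =>
    intro ys hx hy hlen h
    cases ys with
    | nil => simp at hlen
    | cons b bs =>
      cases as with
      | nil =>
        cases bs with
        | nil => simpa [PySem.Chars.join_singleton] using h
        | cons b' bs' => simp at hlen
      | cons a' as' =>
        cases bs with
        | nil => simp at hlen
        | cons b' bs' =>
          rw [PySem.Chars.join_cons_cons, PySem.Chars.join_cons_cons] at h
          have h' : a ++ c :: PySem.Chars.join [c] (a' :: as')
              = b ++ c :: PySem.Chars.join [c] (b' :: bs') := by simpa using h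
          obtain ⟨he, hj⟩ := pvSep_cancel c _ _ a b (hx a List.mem_cons_self)
            (hy b List.mem_cons_self) h'
          have htl := ih (b' :: bs') (fun p hp => hx p (List.mem_cons_of_mem a hp))
            (fun p hp => hy p (List.mem_cons_of_mem b hp)) (by simpa using hlen) hj
          rw [he, htl]

theorem pvGetD_neg_one {α : Type} (xs : List α) (d : α) :
    PySem.List.pyGetD xs (-1) d = xs.getLast?.getD d := by
  cases xs with
  | nil => simp [PySem.List.pyGetD, PySem.List.pyGet?, PySem.List.pyIdx?]
  | cons x rest =>
    simp [PySem.List.pyGetD, PySem.List.pyGet?, PySem.List.pyIdx?, List.getLast?_eq_getElem?]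

theorem pvSyl_eq (u : String) :
    (PySem.Str.split? u "/").getD [] = (pvSplit '/' u.toList []).map String.ofList := by
  have : ("/" : String).toList = ['/'] := by decide
  simp [PySem.Str.split?, PySem.Chars.split?, this, pvSplitOn_eq]

theorem pvSyl_join (u : String) :
    PySem.Str.join "/" ((PySem.Str.split? u "/").getD []) = u := by
  rw [pvSyl_eq]
  have hc : ("/" : String).toList = ['/'] := by decide
  unfold PySem.Str.join
  rw [hc]
  have : (((pvSplit '/' u.toList []).map String.ofList).map String.toList) = pvSplit '/' u.toList [] := by
    rw [List.map_map]
    have : (String.toList ∘ String.ofList) = id := by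
      funext l; simp
    rw [this, List.map_id]
  rw [this, pvSplit_join]
  simp [String.ofList_toList]

theorem pvSyl_free (u : String) :
    ∀ s ∈ (PySem.Str.split? u "/").getD [], ('/' : Char) ∉ s.toList := by
  rw [pvSyl_eq]
  intro s hs
  obtain ⟨p, hp, rfl⟩ := List.mem_map.mp hs
  rw [String.toList_ofList]
  exact pvSplit_free '/' u.toList [] (by simp) p hp

def pvIni (s : String) : String := String.ofList [(PySem.Str.pyGet? s 0).getD ' ']

def pvAbbr (syl : List String) : List String :=
  (syl.take (syl.length - 1)).map pvIni ++ [syl.getD (syl.length - 1) ""]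

theorem pvAbbr_length (syl : List String) (h : 1 ≤ syl.length) :
    (pvAbbr syl).length = syl.length := by
  simp [pvAbbr]
  omega

theorem pvIni_of_ne (x : String) (hx : x ≠ "") :
    ∃ c cs, x.toList = c :: cs ∧ pvIni x = String.ofList [c] := by
  cases hc : x.toList with
  | nil => exact absurd (by rw [← String.ofList_toList (s := x), hc]) hx
  | cons c cs =>
    refine ⟨c, cs, rfl, ?_⟩
    unfold pvIni
    rw [PySem.Str.pyGet?_eq, PySem.Chars.pyGet?_eq_listPyGet?, hc]
    simp [PySem.List.pyGet?, PySem.List.pyIdx?]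

theorem pvIni_eq_iff (x : String) (hx : x ≠ "") :
    x = pvIni x ↔ x.toList.length = 1 := by
  obtain ⟨c, cs, hc, hieq⟩ := pvIni_of_ne x hx
  rw [hieq]
  constructor
  · intro h
    rw [h, String.toList_ofList]
    rfl
  · intro h
    rw [hc] at h
    have : cs = [] := by
      simpa using h
    rw [← String.ofList_toList (s := x), hc, this]

theorem pvMix_get? {α : Type} (xs ys : List α) (_hlen : ys.length = xs.length)
    (j : Nat) (hj : j ≤ xs.length) (i : Nat) :
    (xs.take j ++ ys.drop j)[i]? = if i < j then xs[i]? else ys[i]? := by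
  by_cases h : i < j
  · rw [List.getElem?_append_left (by simp; omega)]
    simp [h]
  · rw [List.getElem?_append_right (by simp; omega), List.getElem?_drop]
    have hlt : (xs.take j).length = j := by simp; omega
    rw [hlt]
    simp [h]
    congr 1
    omega

theorem pvTakeDrop_eq_iff {α : Type} (xs ys : List α) (hlen : ys.length = xs.length)
    (j k : Nat) (hjk : j ≤ k) (hk : k ≤ xs.length) :
    (xs.take j ++ ys.drop j = xs.take k ++ ys.drop k) ↔
      ∀ i, j ≤ i → i < k → xs[i]? = ys[i]? := by
  rw [List.ext_getElem?_iff]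
  constructor
  · intro h i hji hik
    have := h i
    rw [pvMix_get? xs ys hlen j (by omega) i, pvMix_get? xs ys hlen k hk i] at this
    rw [if_neg (by omega), if_pos (by omega)] at this
    exact this.symm
  · intro h i
    rw [pvMix_get? xs ys hlen j (by omega) i, pvMix_get? xs ys hlen k hk i]
    by_cases h1 : i < j
    · rw [if_pos h1, if_pos (by omega)]
    · by_cases h2 : i < k
      · rw [if_neg h1, if_pos h2]
        exact (h i (by omega) h2).symm
      · rw [if_neg h1, if_neg h2]

def pvCand (syl abbr : List String) (k : Nat) : String :=
  PySem.Str.join "/" (syl.take k ++ abbr.drop k)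

theorem pvAbbr_free (syl : List String)
    (hfree : ∀ s ∈ syl, ('/' : Char) ∉ s.toList)
    (hne : ∀ s ∈ syl.take (syl.length - 1), s ≠ "") :
    ∀ s ∈ pvAbbr syl, ('/' : Char) ∉ s.toList := by
  intro s hs
  rcases List.mem_append.mp hs with h | h
  · obtain ⟨x, hx, rfl⟩ := List.mem_map.mp h
    obtain ⟨c, cs, hc, hieq⟩ := pvIni_of_ne x (hne x hx)
    rw [hieq, String.toList_ofList]
    have hcx : c ∈ x.toList := by rw [hc]; exact List.mem_cons_self
    have := hfree x (List.mem_of_mem_take hx)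
    simp
    intro hcontra
    exact this (hcontra ▸ hcx)
  · have hs' : s = syl.getD (syl.length - 1) "" := by simpa using h
    subst hs'
    by_cases hlen : syl.length = 0
    · have hnil : syl = [] := List.eq_nil_of_length_eq_zero hlen
      subst hnil
      simp [List.getD]
    · have hlt : syl.length - 1 < syl.length := by omega
      rw [List.getD_eq_getElem syl "" hlt]
      exact hfree _ (List.getElem_mem hlt)

theorem pvOfList_inj (a b : List Char) : String.ofList a = String.ofList b ↔ a = b := by
  constructor
  · intro h
    have := congrArg String.toList h
    simpa using this
  · intro h; rw [h]

theorem pvCand_eq_iff (syl : List String)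
    (hfree : ∀ s ∈ syl, ('/' : Char) ∉ s.toList)
    (hne : ∀ s ∈ syl.take (syl.length - 1), s ≠ "")
    (h2 : 2 ≤ syl.length) (j k : Nat) (hjk : j ≤ k) (hk : k ≤ syl.length) :
    (pvCand syl (pvAbbr syl) j = pvCand syl (pvAbbr syl) k ↔
      ∀ i, j ≤ i → i < k → i + 1 < syl.length → (syl.getD i "").toList.length = 1) := by
  have hal : (pvAbbr syl).length = syl.length := pvAbbr_length syl (by omega)
  have hfreeA := pvAbbr_free syl hfree hne
  have hsep : ("/" : String).toList = ['/'] := by decide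
  -- step 1: string equality ↔ part-list equality
  have hparts : (pvCand syl (pvAbbr syl) j = pvCand syl (pvAbbr syl) k ↔
      syl.take j ++ (pvAbbr syl).drop j = syl.take k ++ (pvAbbr syl).drop k) := by
    unfold pvCand PySem.Str.join
    rw [hsep, pvOfList_inj]
    constructor
    · intro h
      have hinj := pvJoin_inj '/' ((syl.take j ++ (pvAbbr syl).drop j).map String.toList)
        ((syl.take k ++ (pvAbbr syl).drop k).map String.toList)
        (by
          intro p hp
          obtain ⟨x, hx, rfl⟩ := List.mem_map.mp hp
          rcases List.mem_append.mp hx with h' | h'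
          · exact hfree x (List.mem_of_mem_take h')
          · exact hfreeA x (List.mem_of_mem_drop h'))
        (by
          intro p hp
          obtain ⟨x, hx, rfl⟩ := List.mem_map.mp hp
          rcases List.mem_append.mp hx with h' | h'
          · exact hfree x (List.mem_of_mem_take h')
          · exact hfreeA x (List.mem_of_mem_drop h'))
        (by simp; omega) h
      exact List.map_injective_iff.mpr (fun a b hab => String.toList_inj.mp hab) hinj
    · intro h; rw [h]
  rw [hparts, pvTakeDrop_eq_iff syl (pvAbbr syl) hal j k hjk hk]
  -- step 2: elementwise equality ↔ the length-1 condition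
  constructor
  · intro h i hji hik hin
    have hi : i < syl.length := by omega
    have := h i hji hik
    rw [List.getElem?_eq_getElem hi, List.getElem?_eq_getElem (by omega : i < (pvAbbr syl).length)] at this
    have hel : (pvAbbr syl)[i]'(by omega) = pvIni (syl[i]'hi) := by
      unfold pvAbbr
      rw [List.getElem_append_left (by simp; omega)]
      simp
    have hmem : syl[i]'hi ∈ syl.take (syl.length - 1) := by
      rw [List.mem_take_iff_getElem]
      exact ⟨i, by omega, rfl⟩
    have hx := hne _ hmem
    have : syl[i]'hi = pvIni (syl[i]'hi) := by
      have h' := Option.some_injective _ this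
      rw [hel] at h'
      exact h'
    rw [List.getD_eq_getElem syl "" hi]
    exact (pvIni_eq_iff _ hx).mp this
  · intro h i hji hik
    have hi : i < syl.length := by omega
    rw [List.getElem?_eq_getElem hi, List.getElem?_eq_getElem (by omega : i < (pvAbbr syl).length)]
    by_cases hin : i + 1 < syl.length
    · have hel : (pvAbbr syl)[i]'(by omega) = pvIni (syl[i]'hi) := by
        unfold pvAbbr
        rw [List.getElem_append_left (by simp; omega)]
        simp
      have hmem : syl[i]'hi ∈ syl.take (syl.length - 1) := by
        rw [List.mem_take_iff_getElem]
        exact ⟨i, by omega, rfl⟩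
      have hlen1 := h i hji hik hin
      rw [List.getD_eq_getElem syl "" hi] at hlen1
      have := (pvIni_eq_iff _ (hne _ hmem)).mpr hlen1
      rw [hel, ← this]
    · have hieq : i = syl.length - 1 := by omega
      subst hieq
      have hel : (pvAbbr syl)[syl.length - 1]'(by omega) = syl.getD (syl.length - 1) "" := by
        unfold pvAbbr
        rw [List.getElem_append_right (by simp)]
        simp
      rw [hel, List.getD_eq_getElem syl "" (by omega)]

def pvStep (u : String) (out : List String) (c : String) : List String :=
  if c ≠ u ∧ (out.isEmpty = true ∨ c ≠ PySem.List.pyGetD out (-1) "") then out ++ [c] else out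

theorem pvFold_drop (u : String) (cand : Nat → String) (l : List Nat) (out : List String)
    (h : ∀ m ∈ l, cand m = u) :
    l.foldl (fun acc k => pvStep u acc (cand k)) out = out := by
  induction l generalizing out with
  | nil => rfl
  | cons m rest ih =>
    rw [List.foldl_cons]
    have hm : cand m = u := h m List.mem_cons_self
    have : pvStep u out (cand m) = out := by simp [pvStep, hm]
    rw [this]
    exact ih out (fun x hx => h x (List.mem_cons_of_mem m hx))

theorem pvFold_inv (u : String) (cand : Nat → String) (P : Nat → Bool) (N t0 : Nat)
    (HE : ∀ j k, j ≤ k → k ≤ N → (cand j = cand k ↔ ∀ i, j ≤ i → i < k → P i = true))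
    (huN : cand N = u)
    (ht0N : t0 ≤ N)
    (ht2 : t0 = 0 ∨ (0 < t0 ∧ P (t0 - 1) = false)) :
    ∀ m, m ≤ t0 →
      ((List.range m).foldl (fun acc k => pvStep u acc (cand k)) []
        = ((List.range m).filter (fun k => k == 0 || !P (k - 1))).map cand)
      ∧ (∀ j, (((List.range m).filter (fun k => k == 0 || !P (k - 1))).getLast? = some j) →
          j < m ∧ ∀ i, j < i → i < m → P (i - 1) = true) := by
  intro m
  induction m with
  | zero => intro _; refine ⟨by simp, by simp⟩
  | succ m ih =>
    intro hm1
    obtain ⟨ih1, ih2⟩ := ih (by omega)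
    have hmN : m ≤ N := by omega
    have hmu : cand m ≠ u := by
      intro hc
      rw [← huN] at hc
      have hall := (HE m N (by omega) le_rfl).mp hc
      rcases ht2 with h0 | ⟨hpos, hfalse⟩
      · omega
      · have := hall (t0 - 1) (by omega) (by omega)
        rw [hfalse] at this
        exact absurd this (by simp)
    have hran : List.range (m + 1) = List.range m ++ [m] := List.range_succ
    by_cases hm0 : m = 0
    · subst hm0
      refine ⟨?_, ?_⟩
      · simp [pvStep, hmu]
      · intro j hj
        simp at hj
        subst hj
        exact ⟨by omega, fun i h1 h2 => by omega⟩
    · have h0mem : (0 : Nat) ∈ (List.range m).filter (fun k => k == 0 || !P (k - 1)) :=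
        List.mem_filter.mpr ⟨List.mem_range.mpr (by omega), by simp⟩
      have hFne : (List.range m).filter (fun k => k == 0 || !P (k - 1)) ≠ [] :=
        List.ne_nil_of_mem h0mem
      obtain ⟨j, hj⟩ : ∃ j, ((List.range m).filter (fun k => k == 0 || !P (k - 1))).getLast? = some j := by
        cases hh : ((List.range m).filter (fun k => k == 0 || !P (k - 1))).getLast? with
        | none => exact absurd (List.getLast?_eq_none_iff.mp hh) hFne
        | some j => exact ⟨j, rfl⟩
      obtain ⟨hjm, hjP⟩ := ih2 j hj
      have hlast : (((List.range m).filter (fun k => k == 0 || !P (k - 1))).map cand).getLast?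
          = some (cand j) := by
        rw [List.getLast?_map, hj]
        rfl
      have hkey : (cand m = cand j) ↔ P (m - 1) = true := by
        rw [eq_comm, HE j m (by omega) hmN]
        constructor
        · intro h
          exact h (m - 1) (by omega) (by omega)
        · intro hPm i h1 h2
          by_cases hi : i = m - 1
          · rw [hi]; exact hPm
          · exact hjP (i + 1) (by omega) (by omega)
      have hb : (m == 0) = false := by simp [hm0]
      have hmapne : (((List.range m).filter (fun k => k == 0 || !P (k - 1))).map cand) ≠ [] := by
        simp [hFne]
      have hstep : pvStep u (((List.range m).filter (fun k => k == 0 || !P (k - 1))).map cand) (cand m)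
          = if !P (m - 1) then
              (((List.range m).filter (fun k => k == 0 || !P (k - 1))).map cand) ++ [cand m]
            else (((List.range m).filter (fun k => k == 0 || !P (k - 1))).map cand) := by
        unfold pvStep
        rw [pvGetD_neg_one, hlast]
        by_cases hP : P (m - 1) = true
        · rw [if_neg, if_neg (by simp [hP])]
          simp [hkey.mpr hP, List.isEmpty_eq_false_iff.mpr hmapne]
        · rw [if_pos, if_pos (by simp [hP])]
          refine ⟨hmu, Or.inr ?_⟩
          simp
          intro hc
          rw [hkey] at hc
          exact hP hc
      refine ⟨?_, ?_⟩
      · rw [hran, List.foldl_append, ih1, List.filter_append, List.map_append]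
        simp only [List.foldl_cons, List.foldl_nil]
        rw [hstep]
        by_cases hP : P (m - 1) = true
        · rw [if_neg (by simp [hP])]
          have : (List.filter (fun k => k == 0 || !P (k - 1)) [m]) = [] := by
            simp [hb, hP]
          rw [this]
          simp
        · rw [if_pos (by simp [hP])]
          have : (List.filter (fun k => k == 0 || !P (k - 1)) [m]) = [m] := by
            simp [hb, hP]
          rw [this]
          simp
      · intro j' hj'
        rw [hran, List.filter_append] at hj'
        by_cases hP : P (m - 1) = true
        · have : (List.filter (fun k => k == 0 || !P (k - 1)) [m]) = [] := by
            simp [hb, hP]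
          rw [this, List.append_nil, hj] at hj'
          have hj'' : j' = j := (Option.some.inj hj').symm
          subst hj''
          refine ⟨by omega, fun i h1 h2 => ?_⟩
          by_cases hi : i = m
          · rw [hi]; exact hP
          · exact hjP i h1 (by omega)
        · have : (List.filter (fun k => k == 0 || !P (k - 1)) [m]) = [m] := by
            simp [hb, hP]
          rw [this, List.getLast?_concat] at hj'
          have hj'' : j' = m := by simpa using hj'.symm
          subst hj''
          exact ⟨by omega, fun i h1 h2 => by omega⟩

theorem altFindT_spec (syl : List String) : ∀ t,
    altFindT syl t ≤ t ∧
    (∀ i, altFindT syl t ≤ i → i < t → (syl.getD i "").toList.length = 1) ∧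
    (altFindT syl t = 0 ∨
      (0 < altFindT syl t ∧ (syl.getD (altFindT syl t - 1) "").toList.length ≠ 1)) := by
  intro t
  induction t with
  | zero => exact ⟨le_rfl, fun i h1 h2 => by omega, Or.inl rfl⟩
  | succ t ih =>
    have hcond : ((PySem.Str.len (PySem.List.pyGetD syl ((t : Int)) "") == 1) = true)
        ↔ (syl.getD t "").toList.length = 1 := by
      rw [PySem.List.pyGetD_natCast]
      simp [PySem.Str.len]
    obtain ⟨ih1, ih2, ih3⟩ := ih
    by_cases hc : (PySem.Str.len (PySem.List.pyGetD syl ((t : Int)) "") == 1) = true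
    · rw [altFindT, if_pos hc]
      refine ⟨by omega, fun i h1 h2 => ?_, ih3⟩
      by_cases hi : i = t
      · rw [hi]; exact hcond.mp hc
      · exact ih2 i h1 (by omega)
    · rw [altFindT, if_neg hc]
      refine ⟨le_rfl, fun i h1 h2 => by omega, Or.inr ⟨by omega, ?_⟩⟩
      simp only [Nat.add_sub_cancel]
      exact fun h => hc (hcond.mpr h)

theorem pvGetLast_getD {α : Type} (xs : List α) (d : α) :
    xs.getLast?.getD d = xs.getD (xs.length - 1) d := by
  rw [List.getLast?_eq_getElem?, List.getD_eq_getElem?_getD]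

theorem pvInitials_eq (syl : List String) (h2 : 2 ≤ syl.length) :
    (PySem.List.slice syl none (some ((syl.length : Int) - 1))).map
        (fun s => String.ofList [(PySem.Str.pyGet? s 0).getD ' '])
      ++ [PySem.List.pyGetD syl (-1) ""] = pvAbbr syl := by
  have hcast : ((syl.length : Int) - 1) = ((syl.length - 1 : Nat) : Int) := by omega
  rw [hcast, PySem.List.slice_to_natCast, pvGetD_neg_one, pvGetLast_getD]
  rfl

theorem pvB_eq (u : String) (syl : List String)
    (hsyl : syl = (PySem.Str.split? u "/").getD []) (h2 : 2 ≤ syl.length)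
    (hne : ∀ s ∈ syl.take (syl.length - 1), s ≠ "") :
    abbrev_variants_alt u =
      ((List.range (altFindT syl (syl.length - 1))).filter
        (fun k => k == 0 || !((syl.getD (k - 1) "").toList.length == 1))).map
        (pvCand syl (pvAbbr syl)) := by
  have ht := (altFindT_spec syl (syl.length - 1)).1
  unfold abbrev_variants_alt
  rw [← hsyl]
  have hn2 : ¬ ((syl.length : Int) < 2) := by exact_mod_cast not_lt.mpr (by exact_mod_cast h2)
  simp only [if_neg hn2]
  rw [pvInitials_eq syl h2, PySem.List.pyRange_one]
  simp only [Int.sub_zero, Int.toNat_natCast, Int.zero_add]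
  rw [List.filter_map, List.map_map]
  have hfc : ∀ k ∈ List.range (altFindT syl (syl.length - 1)),
      ((fun (k : Int) => k == 0 || PySem.Str.len (PySem.List.pyGetD syl (k - 1) "") > 1) ∘
        (fun (k : Nat) => (k : Int))) k
      = (fun k => k == 0 || !((syl.getD (k - 1) "").toList.length == 1)) k := by
    intro k hk
    have hkt : k < altFindT syl (syl.length - 1) := List.mem_range.mp hk
    by_cases hk0 : k = 0
    · subst hk0
      simp
    · have hcast : ((k : Int) - 1) = ((k - 1 : Nat) : Int) := by omega
      have hb1 : (((k : Nat) : Int) == 0) = false := by simp; omega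
      have hb2 : ((k : Nat) == 0) = false := by simp [hk0]
      simp only [Function.comp_apply, hb1, hb2, Bool.false_or, hcast, PySem.List.pyGetD_natCast]
      have hmem : syl.getD (k - 1) "" ∈ syl.take (syl.length - 1) := by
        have hlt : k - 1 < syl.length := by omega
        rw [List.getD_eq_getElem syl "" hlt, List.mem_take_iff_getElem]
        exact ⟨k - 1, by omega, rfl⟩
      have hlen1 : 1 ≤ (syl.getD (k - 1) "").toList.length := by
        have := hne _ hmem
        cases hl : (syl.getD (k - 1) "").toList with
        | nil => exact absurd (by rw [← String.ofList_toList (s := syl.getD (k - 1) ""), hl]) this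
        | cons a l => simp
      have hSL : PySem.Str.len (syl.getD (k - 1) "") = ((syl.getD (k - 1) "").toList.length : Int) := rfl
      by_cases hl : (syl.getD (k - 1) "").toList.length = 1
      · rw [hSL, hl]
        decide
      · have hgt : ((syl.getD (k - 1) "").toList.length : Int) > 1 := by
          exact_mod_cast (by omega : 1 < (syl.getD (k - 1) "").toList.length)
        have h2' : ((syl.getD (k - 1) "").toList.length == 1) = false :=
          beq_eq_false_iff_ne.mpr hl
        rw [hSL, h2', decide_eq_true hgt]
        rfl
  rw [List.filter_congr hfc]
  refine List.map_congr_left ?_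
  intro k hk
  simp only [Function.comp_apply, PySem.List.slice_to_natCast, PySem.List.slice_from_natCast]
  rfl

theorem loopA_inv (u : String) (syl abbr : List String) (h : abbr.length = syl.length)
    (m : Nat) (hm : m ≤ syl.length) (v0 : List String) :
    (List.range m).foldl
      (fun (st : List String × List String) i =>
        (pvStep u st.1 (PySem.Str.join "/" (st.2.set i (syl.getD i ""))),
         st.2.set i (syl.getD i "")))
      (v0, abbr)
    = ((List.range m).foldl (fun out i => pvStep u out (pvCand syl abbr (i+1))) v0,
       syl.take m ++ abbr.drop m) := by
  induction m generalizing v0 with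
  | zero => simp
  | succ m ih =>
    have hlt : m < syl.length := by omega
    rw [List.range_succ, List.foldl_append, List.foldl_append, ih (by omega)]
    simp only [List.foldl_cons, List.foldl_nil]
    have hlen : (syl.take m).length = m := by simp [hlt.le]
    have h1 : (syl.take m ++ abbr.drop m).set (syl.take m).length (syl.getD m "")
        = syl.take m ++ (abbr.drop m).set 0 (syl.getD m "") := by simp
    rw [hlen] at h1
    have h2 : (syl.take m ++ abbr.drop m).set m (syl.getD m "")
        = syl.take (m+1) ++ abbr.drop (m+1) := by
      rw [h1, List.drop_eq_getElem_cons (by omega : m < abbr.length), List.set_cons_zero,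
        List.getD_eq_getElem syl "" hlt, ← List.take_append_getElem hlt, List.append_assoc]
      simp
    rw [h2]
    rfl

theorem pvA_eq_fold (u : String) (syl : List String)
    (hsyl : syl = (PySem.Str.split? u "/").getD []) (h2 : 2 ≤ syl.length) :
    abbrev_variants u
      = (List.range (syl.length - 1)).foldl
          (fun out k => pvStep u out (pvCand syl (pvAbbr syl) k)) [] := by
  unfold abbrev_variants
  rw [← hsyl]
  have hn2 : ¬ ((syl.length : Int) < 2) := by exact_mod_cast not_lt.mpr (by exact_mod_cast h2)
  simp only [if_neg hn2]
  rw [pvInitials_eq syl h2]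
  have hablen : (pvAbbr syl).length = syl.length := pvAbbr_length syl (by omega)
  have hc2 : ((syl.length : Int) - 2) = ((syl.length - 2 : Nat) : Int) := by omega
  rw [hc2, PySem.List.pyRange_one]
  simp only [Int.sub_zero, Int.toNat_natCast, Int.zero_add, List.foldl_map,
    PySem.List.pySetD_natCast, PySem.List.pyGetD_natCast]
  show (List.foldl
      (fun (st : List String × List String) i =>
        (pvStep u st.1 (PySem.Str.join "/" (st.2.set i (syl.getD i ""))), st.2.set i (syl.getD i "")))
      ((if PySem.Str.join "/" (pvAbbr syl) ≠ u then [PySem.Str.join "/" (pvAbbr syl)] else []), pvAbbr syl)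
      (List.range (syl.length - 2))).1
    = List.foldl (fun out k => pvStep u out (pvCand syl (pvAbbr syl) k)) [] (List.range (syl.length - 1))
  rw [loopA_inv u syl (pvAbbr syl) hablen (syl.length - 2) (by omega)]
  have hsplit : syl.length - 1 = (syl.length - 2) + 1 := by omega
  rw [hsplit, List.range_succ_eq_map, List.foldl_cons, List.foldl_map]
  have hv0 : (if PySem.Str.join "/" (pvAbbr syl) ≠ u then [PySem.Str.join "/" (pvAbbr syl)] else [])
      = pvStep u [] (pvCand syl (pvAbbr syl) 0) := by
    simp [pvStep, pvCand]
  rw [hv0]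

theorem pvMain (u : String)
    (hpre : 2 ≤ ((PySem.Str.split? u "/").getD []).length →
      ∀ s ∈ ((PySem.Str.split? u "/").getD []).dropLast, s ≠ "") :
    abbrev_variants u = abbrev_variants_alt u := by
  by_cases h2 : 2 ≤ ((PySem.Str.split? u "/").getD []).length
  case neg =>
    have hn2 : ((((PySem.Str.split? u "/").getD []).length : Int) < 2) := by
      exact_mod_cast (by omega : ((PySem.Str.split? u "/").getD []).length < 2)
    unfold abbrev_variants abbrev_variants_alt
    rw [if_pos hn2, if_pos hn2]
  case pos =>
    set syl := (PySem.Str.split? u "/").getD [] with hsyl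
    have hne : ∀ s ∈ syl.take (syl.length - 1), s ≠ "" := by
      rw [← List.dropLast_eq_take]
      exact hpre h2
    have hfree := pvSyl_free u
    rw [← hsyl] at hfree
    obtain ⟨ht0N, ht1, ht3⟩ := altFindT_spec syl (syl.length - 1)
    set t0 := altFindT syl (syl.length - 1) with ht0
    set P : Nat → Bool := fun i => ((syl.getD i "").toList.length == 1) with hP
    have HE : ∀ j k, j ≤ k → k ≤ syl.length - 1 →
        (pvCand syl (pvAbbr syl) j = pvCand syl (pvAbbr syl) k ↔
          ∀ i, j ≤ i → i < k → P i = true) := by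
      intro j k hjk hk
      rw [pvCand_eq_iff syl hfree hne h2 j k hjk (by omega)]
      constructor
      · intro h i hi1 hi2
        exact beq_iff_eq.mpr (h i hi1 hi2 (by omega))
      · intro h i hi1 hi2 _
        exact beq_iff_eq.mp (h i hi1 hi2)
    have hdropAbbr : (pvAbbr syl).drop (syl.length - 1) = [syl.getD (syl.length - 1) ""] := by
      unfold pvAbbr
      have hlen : ((syl.take (syl.length - 1)).map pvIni).length = syl.length - 1 := by
        simp
      exact List.drop_left' hlen
    have huN : pvCand syl (pvAbbr syl) (syl.length - 1) = u := by
      unfold pvCand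
      rw [hdropAbbr, List.getD_eq_getElem syl "" (by omega : syl.length - 1 < syl.length),
        List.take_append_getElem, show syl.length - 1 + 1 = syl.length by omega, List.take_length]
      exact pvSyl_join u
    have ht3' : t0 = 0 ∨ (0 < t0 ∧ P (t0 - 1) = false) := by
      rcases ht3 with h | ⟨hp, hb⟩
      · exact Or.inl h
      · exact Or.inr ⟨hp, beq_eq_false_iff_ne.mpr hb⟩
    obtain ⟨hfold, -⟩ := pvFold_inv u (pvCand syl (pvAbbr syl)) P (syl.length - 1) t0
      HE huN ht0N ht3' t0 le_rfl
    have hdropseg : ∀ m ∈ (List.range (syl.length - 1 - t0)).map (t0 + ·),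
        pvCand syl (pvAbbr syl) m = u := by
      intro m hm
      obtain ⟨x, hx, rfl⟩ := List.mem_map.mp hm
      have hxlt := List.mem_range.mp hx
      rw [← huN]
      exact (HE (t0 + x) (syl.length - 1) (by omega) le_rfl).mpr
        (fun i hi1 hi2 => beq_iff_eq.mpr (ht1 i (by omega) hi2))
    rw [pvA_eq_fold u syl hsyl h2, pvB_eq u syl hsyl h2 hne,
      show syl.length - 1 = t0 + (syl.length - 1 - t0) from by omega, List.range_add,
      List.foldl_append, pvFold_drop u _ _ _ hdropseg,
      show t0 + (syl.length - 1 - t0) = syl.length - 1 from by omega, ← ht0]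
    exact hfold

-- ===== VERDICT (by name: the statement is the Claim_ definition above) =====
theorem abbrev_variants_spec : Claim_equal_abbrev_variants := by
  intro unit_str _ hpre
  unfold Spec_abbrev_variants
  exact pvMain unit_str hpre
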